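-- pv_equiv track=rewrite | github.com/abidkhan484/problem_solving | hackerrank_solution/balanced_array.py | solve
-- ===== SOURCE A (Python) =====
-- def solve(a):
--     left_sum = 0
--     right_sum = 0
--     m =len(a)
--     n = m // 2
--     for i in range(n):
--         left_sum += a[i]
--         right_sum += a[m-i-1]
--
--     if left_sum > right_sum:
--         return left_sum-right_sum
--     elif right_sum > left_sum:
--         return right_sum-left_sum
--     else:
--         return 0
-- ===== SOURCE B (Python) =====
-- def solve(a):
--     m = len(a)
--     n = m // 2
--     total = sum(a)
--     middle = a[n] if m % 2 == 1 else 0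
--     left = sum(a[:n])
--     return abs(2 * left + middle - total)
-- ===== Notes on version B (the rewrite author's own statement) =====
-- stated objective: alternative
-- what changed: Instead of walking the list from both ends accumulating the two half-sums, B derives the right-half sum algebraically from the total (right = total - left - middle), summing only the whole list and the left half and returning |2*left + middle - total|.
import Mathlib
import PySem

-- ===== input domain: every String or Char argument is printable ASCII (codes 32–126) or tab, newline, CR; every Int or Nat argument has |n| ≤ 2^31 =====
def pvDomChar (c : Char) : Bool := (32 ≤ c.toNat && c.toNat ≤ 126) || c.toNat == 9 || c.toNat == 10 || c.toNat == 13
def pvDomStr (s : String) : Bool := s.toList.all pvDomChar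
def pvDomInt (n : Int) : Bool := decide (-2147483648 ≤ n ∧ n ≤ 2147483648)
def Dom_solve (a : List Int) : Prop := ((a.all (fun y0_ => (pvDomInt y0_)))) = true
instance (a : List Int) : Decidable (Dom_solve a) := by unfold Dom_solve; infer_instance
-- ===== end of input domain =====

-- B never reads the right half: it derives the right-half sum algebraically from the total
-- sum (right = total - left - middle) and returns |2*left + middle - total| (objective: alternative).

-- ===== PORT A =====
def solve (a : List Int) : Int :=
  let m : Int := a.length
  let n : Int := PySem.Int.floordiv m 2
  let p := (PySem.List.pyRange 0 n 1).foldl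
    (fun (p : Int × Int) i =>
      (p.1 + PySem.List.pyGetD a i 0, p.2 + PySem.List.pyGetD a (m - i - 1) 0)) (0, 0)
  if p.1 > p.2 then p.1 - p.2
  else if p.2 > p.1 then p.2 - p.1
  else 0

-- ===== PORT B =====
def solve_alt (a : List Int) : Int :=
  let m : Int := a.length
  let n : Int := PySem.Int.floordiv m 2
  let total : Int := a.sum
  let middle : Int := if PySem.Int.mod m 2 = 1 then PySem.List.pyGetD a n 0 else 0
  let left : Int := (PySem.List.slice a none (some n)).sum
  |2 * left + middle - total|

-- ===== PRECONDITION & SPEC =====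
def Spec_solve (a : List Int) (out : Int) : Prop := out = solve_alt a
instance (a : List Int) (out : Int) : Decidable (Spec_solve a out) := by unfold Spec_solve; infer_instance

-- ===== CLAIM =====
def Claim_equal_solve : Prop := ∀ (a : List Int), Dom_solve a → Spec_solve a (solve a)

-- ===== LEMMAS AND PROOFS =====

theorem pv_fold_halves (a : List Int) (nn : Nat) (h : nn ≤ a.length) :
    (PySem.List.pyRange 0 (nn : Int) 1).foldl
      (fun (p : Int × Int) i =>
        (p.1 + PySem.List.pyGetD a i 0, p.2 + PySem.List.pyGetD a ((a.length : Int) - i - 1) 0)) (0, 0)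
    = ((a.take nn).sum, (a.drop (a.length - nn)).sum) := by
  induction nn with
  | zero => simp [PySem.List.pyRange_one_eq_nil]
  | succ k ih =>
    have hk : k ≤ a.length := Nat.le_of_succ_le h
    have hlt : k < a.length := h
    have hstep : ((k : Int) + 1) = ((k + 1 : Nat) : Int) := by push_cast; ring
    rw [← hstep, PySem.List.pyRange_one_succ_right (by positivity), List.foldl_append, ih hk]
    simp only [List.foldl_cons, List.foldl_nil, Prod.mk.injEq]
    constructor
    · rw [PySem.List.pyGetD_ofNat a k 0 hlt, List.sum_take_succ a k hlt]
    · have hidx : (a.length : Int) - (k : Int) - 1 = ((a.length - k - 1 : Nat) : Int) := by omega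
      have hlt2 : a.length - k - 1 < a.length := by omega
      rw [hidx, PySem.List.pyGetD_ofNat a (a.length - k - 1) 0 hlt2]
      have hdrop : a.drop (a.length - (k + 1)) = a[a.length - k - 1]'hlt2 :: a.drop (a.length - k) := by
        rw [List.drop_eq_getElem_cons (by omega),
            show a.length - (k + 1) + 1 = a.length - k from by omega]
        congr 1
      rw [hdrop]
      simp [add_comm]

-- total = left + middle + right, with middle = a[n] iff the length is odd
theorem pv_sum_split (a : List Int) :
    a.sum = (a.take (a.length / 2)).sum
      + (if a.length % 2 = 1 then PySem.List.pyGetD a ((a.length / 2 : Nat) : Int) 0 else 0)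
      + (a.drop (a.length - a.length / 2)).sum := by
  set n := a.length / 2 with hn
  rcases Nat.even_or_odd a.length with he | ho
  · have h2 : a.length % 2 = 0 := Nat.even_iff.mp he
    have hmn : a.length - n = n := by omega
    rw [h2, hmn]
    rw [if_neg (by omega), ← List.sum_take_add_sum_drop a n]
    ring
  · have h2 : a.length % 2 = 1 := Nat.odd_iff.mp ho
    have hlt : n < a.length := by omega
    have hmn : a.length - n = n + 1 := by omega
    rw [h2, if_pos rfl, PySem.List.pyGetD_ofNat a n 0 hlt, hmn]
    calc a.sum = (a.take (n+1)).sum + (a.drop (n+1)).sum :=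
          (List.sum_take_add_sum_drop a (n+1)).symm
      _ = (a.take n).sum + a[n] + (a.drop (n+1)).sum := by
          rw [List.sum_take_succ a n hlt]

-- ===== VERDICT =====
theorem solve_spec : Claim_equal_solve := by
  intro a _
  unfold Spec_solve solve solve_alt
  have hfd : PySem.Int.floordiv (a.length : Int) 2 = ((a.length / 2 : Nat) : Int) :=
    PySem.Int.floordiv_natCast a.length 2
  have hmod : PySem.Int.mod (a.length : Int) 2 = ((a.length % 2 : Nat) : Int) :=
    PySem.Int.mod_natCast a.length 2
  simp only [hfd, hmod]
  have hle : a.length / 2 ≤ a.length := Nat.div_le_self _ _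
  rw [pv_fold_halves a (a.length / 2) hle]
  rw [PySem.List.slice_to_natCast a _]
  have hif : (if ((a.length % 2 : Nat) : Int) = 1 then PySem.List.pyGetD a ((a.length / 2 : Nat) : Int) 0 else 0)
      = (if a.length % 2 = 1 then PySem.List.pyGetD a ((a.length / 2 : Nat) : Int) 0 else 0) := by
    by_cases h : a.length % 2 = 1 <;> simp [h] <;> omega
  rw [hif]
  have hsplit := pv_sum_split a
  set L := (a.take (a.length / 2)).sum
  set R := (a.drop (a.length - a.length / 2)).sum
  set M := (if a.length % 2 = 1 then PySem.List.pyGetD a ((a.length / 2 : Nat) : Int) 0 else 0)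
  have : 2 * L + M - a.sum = L - R := by omega
  rw [this]
  rcases abs_cases (L - R) with ⟨h1, h2⟩ | ⟨h1, h2⟩ <;> rw [h1] <;> split_ifs <;> omega
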